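-- pv_equiv track=rewrite | github.com/Tai-Xinwei/MSAGen | tools/scigpt/prot_gen.py | filter_seq
-- ===== SOURCE A (Python) =====
-- def filter_seq(seq):
--     cnt = 1
--     for i in range(1, len(seq)):
--         if seq[i] == seq[i-1]:
--             cnt += 1
--         else:
--             cnt = 1
--         if cnt > 5:
--             return False
--     return True
-- ===== SOURCE B (Python) =====
-- def filter_seq(seq):
--     windows = zip(seq, seq[1:], seq[2:], seq[3:], seq[4:], seq[5:])
--     return not any(len(set(w)) == 1 for w in windows)
-- ===== Notes on version B (the rewrite author's own statement) =====
-- stated objective: alternative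
-- what changed: B enumerates all sliding windows of 6 consecutive elements (zip of six shifted slices) and rejects iff some window collapses to a one-element set, instead of A's stateful scan with a repeat counter that resets on change and returns early.
import Mathlib
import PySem

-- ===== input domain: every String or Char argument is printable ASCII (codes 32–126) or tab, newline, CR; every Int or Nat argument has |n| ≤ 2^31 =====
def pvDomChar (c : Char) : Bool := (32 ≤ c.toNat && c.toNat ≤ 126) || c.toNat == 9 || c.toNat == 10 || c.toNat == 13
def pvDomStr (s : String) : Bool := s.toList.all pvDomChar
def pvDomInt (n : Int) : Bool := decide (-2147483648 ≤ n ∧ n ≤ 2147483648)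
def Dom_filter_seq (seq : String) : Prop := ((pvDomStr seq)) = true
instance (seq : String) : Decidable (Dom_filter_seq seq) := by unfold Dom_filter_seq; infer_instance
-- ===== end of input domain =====

-- B tests each sliding window of 6 characters (zip of six shifted slices + set cardinality)
-- instead of A's running counter that resets on change (objective: alternative, same O(n) cost).


-- ===== PORT A =====
-- loop over i = 1 .. len-1, carrying the previous character and the counter
def filterSeqLoopA : List Char → Char → Nat → Bool
  | [], _, _ => true
  | c :: rest, prev, cnt =>
    let cnt' := if c == prev then cnt + 1 else 1
    if cnt' > 5 then false else filterSeqLoopA rest c cnt'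

def filter_seq (seq : String) : Bool :=
  match seq.toList with
  | [] => true
  | c :: rest => filterSeqLoopA rest c 1

-- ===== PORT B =====
-- zip(s, s[1:], s[2:], s[3:], s[4:], s[5:]): hand port of Python's 6-ary zip
-- (stops at the shortest argument — exact)
def pyZip6 {α : Type} : List α → List α → List α → List α → List α → List α → List (α × α × α × α × α × α)
  | a :: as, b :: bs, c :: cs, d :: ds, e :: es, f :: fs =>
      (a, b, c, d, e, f) :: pyZip6 as bs cs ds es fs
  | _, _, _, _, _, _ => []

def filter_seq_alt (seq : String) : Bool :=
  !((pyZip6 seq.toList (PySem.List.slice seq.toList (some 1) none)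
      (PySem.List.slice seq.toList (some 2) none) (PySem.List.slice seq.toList (some 3) none)
      (PySem.List.slice seq.toList (some 4) none) (PySem.List.slice seq.toList (some 5) none)).any
    (fun w =>
      (PySem.Set.ofList [w.1, w.2.1, w.2.2.1, w.2.2.2.1, w.2.2.2.2.1, w.2.2.2.2.2]).length == 1))

-- ===== PRECONDITION & SPEC =====
def Spec_filter_seq (seq : String) (out : Bool) : Prop := out = filter_seq_alt seq
instance (seq : String) (out : Bool) : Decidable (Spec_filter_seq seq out) := by unfold Spec_filter_seq; infer_instance

-- ===== CLAIM (what is proved, stated in full; the proofs are below) =====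
def Claim_equal_filter_seq : Prop := ∀ (seq : String), Dom_filter_seq seq → Spec_filter_seq seq (filter_seq seq)

-- ===== LEMMAS AND PROOFS =====

-- proof-side abbreviations for B's window test
def condW (x a b c d e : Char) : Bool :=
  (PySem.Set.ofList [x, a, b, c, d, e]).length == 1

def any6 (l : List Char) : Bool :=
  (pyZip6 l (l.drop 1) (l.drop 2) (l.drop 3) (l.drop 4) (l.drop 5)).any (fun w =>
      (PySem.Set.ofList [w.1, w.2.1, w.2.2.1, w.2.2.2.1, w.2.2.2.2.1, w.2.2.2.2.2]).length == 1)

lemma alt_eq (seq : String) : filter_seq_alt seq = !(any6 seq.toList) := by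
  unfold filter_seq_alt any6
  rw [PySem.List.slice_from_one, PySem.List.slice_from _ (a := 2) (by norm_num),
      PySem.List.slice_from _ (a := 3) (by norm_num), PySem.List.slice_from _ (a := 4) (by norm_num),
      PySem.List.slice_from _ (a := 5) (by norm_num)]
  simp [List.drop_one]

lemma pyZip6_nil_last {α : Type} (as bs cs ds es : List α) :
    pyZip6 as bs cs ds es ([] : List α) = [] := by
  cases as <;> cases bs <;> cases cs <;> cases ds <;> cases es <;> rfl

lemma any6_short (l : List Char) (h : l.length ≤ 5) : any6 l = false := by
  unfold any6
  rw [List.drop_eq_nil_of_le h, pyZip6_nil_last]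
  rfl

lemma any6_step (x a b c d e : Char) (r : List Char) :
    any6 (x :: a :: b :: c :: d :: e :: r) =
      (condW x a b c d e || any6 (a :: b :: c :: d :: e :: r)) := by
  unfold any6 condW
  simp [pyZip6]

lemma condW_ne {x y : Char} (a b c d e f : Char) (hx : x ∈ [a, b, c, d, e, f])
    (hy : y ∈ [a, b, c, d, e, f]) (hxy : x ≠ y) : condW a b c d e f = false := by
  unfold condW
  rw [beq_eq_false_iff_ne]
  intro hlen
  obtain ⟨z, hz⟩ := List.length_eq_one_iff.mp hlen
  have hx' : x ∈ PySem.Set.ofList [a, b, c, d, e, f] := (PySem.Set.mem_ofList _ _).mpr hx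
  have hy' : y ∈ PySem.Set.ofList [a, b, c, d, e, f] := (PySem.Set.mem_ofList _ _).mpr hy
  rw [hz] at hx' hy'
  simp at hx' hy'
  exact hxy (hx'.trans hy'.symm)

lemma condW_same (p : Char) : condW p p p p p p = true := by
  unfold condW
  simp [PySem.Set.ofList, PySem.Set.add, PySem.Set.contains]

lemma any6_skip (k : Nat) (prev c : Char) (rest : List Char) (hk : k ≤ 5)
    (hne : (c == prev) = false) :
    any6 (List.replicate k prev ++ c :: rest) = any6 (c :: rest) := by
  induction k with
  | zero => simp
  | succ m ih =>
    have hlist : List.replicate (m + 1) prev ++ c :: rest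
        = prev :: (List.replicate m prev ++ c :: rest) := by
      simp [List.replicate_succ]
    rw [hlist]
    by_cases hlen : (List.replicate m prev ++ c :: rest).length ≤ 4
    · have h1 : (prev :: (List.replicate m prev ++ c :: rest)).length ≤ 5 := by
        simp at hlen ⊢; omega
      have h2 : (c :: rest).length ≤ 5 := by
        simp at hlen ⊢; omega
      rw [any6_short _ h1, any6_short _ h2]
    · -- the list is long enough: expose the first five elements of the tail
      rcases ht : (List.replicate m prev ++ c :: rest) with _ | ⟨a, _ | ⟨b, _ | ⟨c2, _ | ⟨d, _ | ⟨e, r⟩⟩⟩⟩⟩ <;>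
        rw [ht] at hlen <;> simp at hlen
      rw [any6_step]
      have hm : m ≤ 4 := by omega
      have hcne : c ≠ prev := by
        intro h; rw [h] at hne; simp at hne
      -- c is element m of the tail, hence among its first five elements
      have hmlt : m < (List.replicate m prev ++ c :: rest).length := by simp
      have hcget : (List.replicate m prev ++ c :: rest)[m]'hmlt = c := by
        rw [List.getElem_append_right (by simp)]
        simp
      have hmem : c ∈ [a, b, c2, d, e] := by
        have h5 : (List.replicate m prev ++ c :: rest) = [a, b, c2, d, e] ++ r := by
          rw [ht]; rfl
        have hm5 : m < ([a, b, c2, d, e] : List Char).length := by simp; omega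
        have : ([a, b, c2, d, e] ++ r)[m]'(by simp; omega) = ([a, b, c2, d, e] : List Char)[m]'hm5 :=
          List.getElem_append_left hm5
        have hc2 : ([a, b, c2, d, e] : List Char)[m]'hm5 = c := by
          rw [← this]; rw [← hcget]; congr 1; exact h5.symm
        exact hc2 ▸ List.getElem_mem hm5
      have hcond : condW prev a b c2 d e = false := by
        refine condW_ne (x := c) (y := prev) _ _ _ _ _ _ ?_ ?_ hcne
        · exact List.mem_cons_of_mem _ hmem
        · exact List.mem_cons_self
      rw [hcond, Bool.false_or, ← ht, ih (by omega)]

lemma main_loop (rest : List Char) (prev : Char) (cnt : Nat) (h1 : 1 ≤ cnt) (h5 : cnt ≤ 5) :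
    filterSeqLoopA rest prev cnt = !(any6 (List.replicate cnt prev ++ rest)) := by
  induction rest generalizing prev cnt with
  | nil =>
    rw [filterSeqLoopA]
    rw [List.append_nil, any6_short _ (by simp [h5])]
    rfl
  | cons c rest' ih =>
    by_cases hc : (c == prev) = true
    · have hce : c = prev := eq_of_beq hc
      subst hce
      by_cases hcnt : cnt = 5
      · subst hcnt
        rw [show filterSeqLoopA (c :: rest') c 5 = false by simp [filterSeqLoopA]]
        have : List.replicate 5 c ++ c :: rest' = c :: c :: c :: c :: c :: c :: rest' := by
          simp [List.replicate]
        rw [this, any6_step, condW_same]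
        rfl
      · have hlt : cnt + 1 ≤ 5 := by omega
        rw [show filterSeqLoopA (c :: rest') c cnt = filterSeqLoopA rest' c (cnt + 1) by
              simp [filterSeqLoopA]; omega]
        rw [ih c (cnt + 1) (by omega) hlt]
        congr 2
        rw [List.replicate_succ' (n := cnt), List.append_assoc]
        rfl
    · have hcf : (c == prev) = false := by simpa using hc
      rw [show filterSeqLoopA (c :: rest') prev cnt = filterSeqLoopA rest' c 1 by
            simp [filterSeqLoopA, hcf]]
      rw [ih c 1 (by omega) (by omega)]
      rw [any6_skip cnt prev c rest' h5 hcf]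
      rw [show List.replicate 1 c ++ rest' = c :: rest' by simp]

-- ===== VERDICT (by name: the statement is the Claim_ definition above) =====
theorem filter_seq_spec : Claim_equal_filter_seq := by
  intro seq _
  unfold Spec_filter_seq
  rw [alt_eq]
  unfold filter_seq
  cases hl : seq.toList with
  | nil => rw [any6_short _ (by simp)]; rfl
  | cons c rest =>
    show filterSeqLoopA rest c 1 = !any6 (c :: rest)
    rw [main_loop rest c 1 (by omega) (by omega)]
    simp
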